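-- pv_equiv track=rewrite | github.com/Krogager/Thompsons-group | Thompsonsgroup.py | merge_np
-- ===== SOURCE A (Python) =====
-- def delta(w, k):
--     """ w is a word and k is an integer. Returns the corresponding word where
--     every generator has its index increased by k. """
--     for i in range(len(w)):
--         w[i][0] = w[i][0] + k
--     return w
--
-- def merge_np(n, p, a, b):
--     """ Takes as input two seminormal forms n and p, where n only has negative
--     exponents and p only has positive exponents. a and b are integers.
--     Returns a seminormal form for the element delta_a(n)delta_b(p). """
--     if len(n) == 0 or len(p) == 0:
--         return delta(n,a) + delta(p,b)
--     elif n[-1][0] + a == p[0][0] + b: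
--         n.pop()
--         p.pop(0)
--         return merge_np(n, p, a, b)
--     elif n[-1][0] + a < p[0][0] + b:
--         x = [ [n[-1][0] + a, -1] ]
--         n.pop()
--         w = merge_np(n, p, a, b+1)
--         return w + x
--     elif n[-1][0] + a > p[0][0] + b:
--         x = [ [p[0][0] + b, 1] ]
--         p.pop(0)
--         w = merge_np(n, p, a+1, b)
--         return x + w
-- ===== SOURCE B (Python) =====
-- def merge_np(n, p, a, b):
--     """Iterative two-pointer merge with cumulative offsets, instead of the
--     recursion with list concatenations and pop(0).
--     Unlike the original it does not mutate n or p."""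
--     i, j = len(n) - 1, 0
--     front = []
--     back = []
--     while i >= 0 and j < len(p):
--         x = n[i][0] + a
--         y = p[j][0] + b
--         if x == y:
--             i -= 1
--             j += 1
--         elif x < y:
--             back.append([x, -1])
--             i -= 1
--             b += 1
--         else:
--             front.append([y, 1])
--             j += 1
--             a += 1
--     mid = [[w[0] + a] + w[1:] for w in n[:i + 1]] + [[w[0] + b] + w[1:] for w in p[j:]]
--     back.reverse()
--     return front + mid + back
-- ===== Notes on version B (the rewrite author's own statement) =====
-- stated objective: alternative
-- what changed: Replaced A's recursion (which concatenates partial results and uses pop(0) on each step) by a single iterative two-pointer loop over n from the right and p from the left, collecting the emitted letters in two flat lists; also B does not mutate its arguments while A pops from and rewrites n and p in place (the claim is about the return value).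
-- outside the precondition, e.g. on merge_np([[]], [], 0, 0): A raises IndexError, B raises IndexError
import Mathlib
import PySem

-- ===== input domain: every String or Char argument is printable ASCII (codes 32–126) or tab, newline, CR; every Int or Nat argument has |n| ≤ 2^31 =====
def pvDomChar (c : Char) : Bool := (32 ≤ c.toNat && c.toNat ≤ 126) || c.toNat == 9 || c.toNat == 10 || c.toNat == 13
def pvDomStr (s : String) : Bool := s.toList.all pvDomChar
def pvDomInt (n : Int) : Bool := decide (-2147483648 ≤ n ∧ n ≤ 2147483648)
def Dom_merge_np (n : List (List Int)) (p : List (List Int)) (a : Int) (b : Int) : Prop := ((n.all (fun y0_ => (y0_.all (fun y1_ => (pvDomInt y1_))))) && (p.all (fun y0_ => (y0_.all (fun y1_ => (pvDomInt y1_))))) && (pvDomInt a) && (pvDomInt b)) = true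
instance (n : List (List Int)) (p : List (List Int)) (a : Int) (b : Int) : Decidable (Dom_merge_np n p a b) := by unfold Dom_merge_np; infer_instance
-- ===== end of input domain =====

-- B replaces A's recursion-with-concatenation by one iterative two-pointer merge (objective: alternative).
-- A mutates n and p in place (pops, delta rewrites); the equivalence proved here is about the return value only.

-- ===== PORT A =====
-- delta(w, k): adds k to the first entry of every inner list (empty inner list ⇒ IndexError in Python, excluded by Pre_; here it is left unchanged)
def deltaA (w : List (List Int)) (k : Int) : List (List Int) :=
  w.map (fun e => match e with
    | [] => []            -- unreachable under Pre_merge_np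
    | x :: r => (x + k) :: r)

def merge_np (n : List (List Int)) (p : List (List Int)) (a : Int) (b : Int) : List (List Int) :=
  if h : n = [] ∨ p = [] then deltaA n a ++ deltaA p b
  else
    have hn : n ≠ [] := fun e => h (Or.inl e)
    have hp : p ≠ [] := fun e => h (Or.inr e)
    let x := (n.getLast hn).headD 0 + a      -- n[-1][0] + a (headD 0 unreachable default under Pre_)
    let y := (p.head hp).headD 0 + b         -- p[0][0] + b
    if x = y then merge_np n.dropLast p.tail a b
    else if x < y then merge_np n.dropLast p a (b + 1) ++ [[x, -1]]
    else [[y, 1]] ++ merge_np n p.tail (a + 1) b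
termination_by n.length + p.length
decreasing_by
  all_goals
    simp only [List.length_dropLast, List.length_tail]
    have := List.length_pos_iff.mpr hn
    have := List.length_pos_iff.mpr hp
    omega

-- ===== PORT B =====
-- [w[0] + k] + w[1:]  (empty inner list ⇒ IndexError in Python, excluded by Pre_)
def deltaB (w : List Int) (k : Int) : List Int :=
  match w with
  | [] => []              -- unreachable under Pre_merge_np
  | x :: r => (x + k) :: r

-- the while loop of B; rn is the not-yet-consumed part of n held reversed (index i runs down),
-- rp the not-yet-consumed tail of p; returns (front, back, rn, rp, a, b) at loop exit
def mergeLoop : List (List Int) → List (List Int) → Int → Int →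
    List (List Int) → List (List Int) →
    List (List Int) × List (List Int) × List (List Int) × List (List Int) × Int × Int
  | [], rp, a, b, front, back => (front, back, [], rp, a, b)          -- i < 0: loop exits
  | u :: rn, [], a, b, front, back => (front, back, u :: rn, [], a, b) -- j = len(p): loop exits
  | u :: rn, v :: rp, a, b, front, back =>
    let x := u.headD 0 + a
    let y := v.headD 0 + b
    if x = y then mergeLoop rn rp a b front back
    else if x < y then mergeLoop rn (v :: rp) a (b + 1) front (back ++ [[x, -1]])
    else mergeLoop (u :: rn) rp (a + 1) b (front ++ [[y, 1]]) back

-- the assembly 'front + mid + back' after the loop (back is reversed, as in Source B)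
def assemble (st : List (List Int) × List (List Int) × List (List Int) × List (List Int) × Int × Int) : List (List Int) :=
  st.1 ++ (st.2.2.1.reverse.map (fun w => deltaB w st.2.2.2.2.1) ++ st.2.2.2.1.map (fun w => deltaB w st.2.2.2.2.2)) ++ st.2.1.reverse

def merge_np_alt (n : List (List Int)) (p : List (List Int)) (a : Int) (b : Int) : List (List Int) :=
  assemble (mergeLoop n.reverse p a b [] [])

-- ===== PRECONDITION & SPEC =====
-- Pre_ excludes inputs containing an empty inner list: Python A's n[-1][0]/p[0][0]/delta raise IndexError there (B raises too).
def Pre_merge_np (n : List (List Int)) (p : List (List Int)) (a : Int) (b : Int) : Prop :=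
  (∀ w ∈ n, w ≠ []) ∧ (∀ w ∈ p, w ≠ [])
instance (n : List (List Int)) (p : List (List Int)) (a : Int) (b : Int) : Decidable (Pre_merge_np n p a b) := by unfold Pre_merge_np; infer_instance
def pvWitness_merge_np : List (List Int) × List (List Int) × Int × Int := ([[1, -1], [0, -2]], [[0, 1], [2, 1]], 0, 1)

def Spec_merge_np (n : List (List Int)) (p : List (List Int)) (a : Int) (b : Int) (out : List (List Int)) : Prop := out = merge_np_alt n p a b
instance (n : List (List Int)) (p : List (List Int)) (a : Int) (b : Int) (out : List (List Int)) : Decidable (Spec_merge_np n p a b out) := by unfold Spec_merge_np; infer_instance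

-- ===== CLAIM (what is proved, stated in full; the proofs are below) =====
def Claim_equal_merge_np : Prop := ∀ (n : List (List Int)) (p : List (List Int)) (a : Int) (b : Int), Dom_merge_np n p a b → Pre_merge_np n p a b → Spec_merge_np n p a b (merge_np n p a b)

-- ===== LEMMAS AND PROOFS =====

theorem deltaA_eq_map_deltaB (w : List (List Int)) (k : Int) :
    deltaA w k = w.map (fun e => deltaB e k) := rfl

-- loop invariant: assembling the loop's final state yields front ++ merge_np rn.reverse rp a b ++ back.reverse
theorem mergeLoop_eq (k : Nat) :
    ∀ (rn rp : List (List Int)) (a b : Int) (front back : List (List Int)),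
      rn.length + rp.length ≤ k →
      assemble (mergeLoop rn rp a b front back)
      = front ++ merge_np rn.reverse rp a b ++ back.reverse := by
  induction k with
  | zero =>
    intro rn rp a b front back hk
    have hrn : rn = [] := by cases rn <;> simp at hk ⊢
    have hrp : rp = [] := by cases rp <;> simp at hk ⊢
    subst hrn; subst hrp
    simp [mergeLoop, assemble, merge_np, deltaA_eq_map_deltaB]
  | succ k ih =>
    intro rn rp a b front back hk
    match rn, rp with
    | [], rp =>
      simp [mergeLoop, assemble, merge_np, deltaA_eq_map_deltaB]
    | u :: rn, [] =>
      simp [mergeLoop, assemble, merge_np, deltaA_eq_map_deltaB]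
    | u :: rn, v :: rp =>
      have hne : ¬((u :: rn).reverse = [] ∨ (v :: rp) = []) := by simp
      have hlast : ∀ h, ((u :: rn).reverse.getLast h) = u := by
        intro h
        simp [List.getLast_eq_head_reverse]
      have hdrop : (u :: rn).reverse.dropLast = rn.reverse := by
        simp
      rw [merge_np]
      rw [dif_neg hne]
      simp only [hlast, List.head_cons, List.tail_cons, hdrop]
      simp only [mergeLoop]
      split_ifs with h1 h2
      · rw [ih rn rp a b front back (by simp at hk ⊢; omega)]
      · rw [ih rn (v :: rp) a (b + 1) front (back ++ [[u.headD 0 + a, -1]]) (by simp at hk ⊢; omega)]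
        simp
      · rw [ih (u :: rn) rp (a + 1) b (front ++ [[v.headD 0 + b, 1]]) back (by simp at hk ⊢; omega)]
        simp

-- ===== VERDICT (by name: the statement is the Claim_ definition above) =====
theorem merge_np_spec : Claim_equal_merge_np := by
  intro n p a b _ _
  unfold Spec_merge_np merge_np_alt
  have h := mergeLoop_eq (n.reverse.length + p.length) n.reverse p a b [] [] (le_refl _)
  simp only [List.reverse_reverse] at h
  simp at h
  exact h.symm
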